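-- pv_equiv track=rewrite | github.com/eclipse-kura/kura | kura/distrib/src/main/resources/common/comment_interfaces_file.py | comment_paragraph
-- ===== SOURCE A (Python) =====
-- def comment_paragraph(paragraph):
--     """Comment a paragraph
--
--     Returns:
--         a paragraph whose lines start with #
--     """
--     commented = ""
--     for line in paragraph.split("\n"):
--         if (not line.startswith("#")):
--             commented += "#" + line + "\n"
--         else:
--             commented += line + "\n"
--     commented += "\n"
--     return (commented)
-- ===== SOURCE B (Python) =====
-- def comment_paragraph(paragraph):
--     """Comment a paragraph
--
--     Returns:
--         a paragraph whose lines start with #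
--     """
--     out = []
--     at_line_start = True
--     for ch in paragraph:
--         if at_line_start and ch != '#':
--             out.append('#')
--         out.append(ch)
--         at_line_start = (ch == '\n')
--     if at_line_start:
--         out.append('#')
--     out.append('\n\n')
--     return ''.join(out)
-- ===== Notes on version B (the rewrite author's own statement) =====
-- stated objective: alternative
-- what changed: Replaced A's split-into-lines loop with per-line branching and string concatenation by a single character-level scan that tracks line starts in a flag and inserts the comment marker where a line does not already begin with one, collecting chars in a list joined once.
import Mathlib
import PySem

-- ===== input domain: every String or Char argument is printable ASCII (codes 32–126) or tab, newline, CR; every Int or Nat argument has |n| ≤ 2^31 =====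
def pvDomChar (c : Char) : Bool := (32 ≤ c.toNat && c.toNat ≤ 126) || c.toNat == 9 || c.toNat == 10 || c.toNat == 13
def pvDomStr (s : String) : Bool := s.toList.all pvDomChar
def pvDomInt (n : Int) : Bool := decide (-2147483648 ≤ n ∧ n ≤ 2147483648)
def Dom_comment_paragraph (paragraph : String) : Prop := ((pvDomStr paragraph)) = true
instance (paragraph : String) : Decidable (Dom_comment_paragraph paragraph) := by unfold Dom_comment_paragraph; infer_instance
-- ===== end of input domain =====

-- B replaces A's split-into-lines / per-line branch / string concatenation with a single
-- character-level scan that inserts '#' at each line start (objective: alternative decomposition).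

-- ===== PORT A =====
-- paragraph.split("\n") ported via PySem.Chars.splitOn on the code points (sep nonempty, so
-- Python's split never raises); each piece back to String for the per-line string operations.
def comment_paragraph (paragraph : String) : String :=
  let lines : List String := (PySem.Chars.splitOn paragraph.toList "\n".toList).map String.ofList
  let commented : String := lines.foldl
    (fun commented line =>
      if !(PySem.Str.startswith line "#") then commented ++ "#" ++ line ++ "\n"
      else commented ++ line ++ "\n") ""
  commented ++ "\n"

-- ===== PORT B =====
-- the loop body of B (one character: optional '#' insertion, then the char; track line start)
def stepB (st : List Char × Bool) (ch : Char) : List Char × Bool :=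
  ((if st.2 && ch != '#' then st.1 ++ ['#'] else st.1) ++ [ch], ch == '\n')

def comment_paragraph_alt (paragraph : String) : String :=
  let st := paragraph.toList.foldl stepB ([], true)
  String.ofList ((if st.2 then st.1 ++ ['#'] else st.1) ++ ['\n', '\n'])

-- ===== PRECONDITION & SPEC =====
def Spec_comment_paragraph (paragraph : String) (out : String) : Prop := out = comment_paragraph_alt paragraph
instance (paragraph : String) (out : String) : Decidable (Spec_comment_paragraph paragraph out) := by unfold Spec_comment_paragraph; infer_instance

-- ===== CLAIM (what is proved, stated in full; the proofs are below) =====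
def Claim_equal_comment_paragraph : Prop := ∀ (paragraph : String), Dom_comment_paragraph paragraph → Spec_comment_paragraph paragraph (comment_paragraph paragraph)

-- ===== LEMMAS AND PROOFS =====

-- Reference splitter: Python's split("\n") on a char list.
def splitNl : List Char → List (List Char)
  | [] => [[]]
  | c :: rest =>
    if c = '\n' then [] :: splitNl rest
    else
      match splitNl rest with
      | h :: t => (c :: h) :: t
      | [] => [[c]]

theorem splitNl_ne_nil (cs : List Char) : splitNl cs ≠ [] := by
  induction cs with
  | nil => simp [splitNl]
  | cons c rest ih =>
    simp only [splitNl]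
    split
    · simp
    · cases h : splitNl rest with
      | nil => simp
      | cons a b => simp

-- prepend a prefix onto the first piece
def consHead (pre : List Char) : List (List Char) → List (List Char)
  | [] => [pre]
  | h :: t => (pre ++ h) :: t

theorem consHead_nil (xs : List (List Char)) (h : xs ≠ []) : consHead [] xs = xs := by
  cases xs with
  | nil => exact absurd rfl h
  | cons a b => simp [consHead]

theorem splitOn_go_eq (fuel : Nat) : ∀ (l cur : List Char) (acc : List (List Char)),
    l.length < fuel →
    PySem.Chars.splitOn.go ['\n'] fuel l cur acc
      = acc.reverse ++ consHead cur.reverse (splitNl l) := by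
  induction fuel with
  | zero => intro l cur acc h; omega
  | succ fuel ih =>
    intro l cur acc h
    cases l with
    | nil =>
      rw [PySem.Chars.splitOn.go]
      · simp [splitNl, consHead]
      · omega
    | cons c rest =>
      rw [PySem.Chars.splitOn.go]
      by_cases hc : c = '\n'
      · subst hc
        have hpre : ['\n'].isPrefixOf ('\n' :: rest) = true := by simp [List.isPrefixOf]
        simp only [hpre, if_true, List.length_cons, List.drop_succ_cons, List.length_nil, List.drop_zero]
        rw [ih rest [] (cur.reverse :: acc) (by simpa using Nat.lt_of_succ_lt_succ h)]
        simp only [List.reverse_nil]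
        rw [consHead_nil _ (splitNl_ne_nil rest)]
        simp [splitNl, consHead]
      · have hpre : ['\n'].isPrefixOf (c :: rest) = false := by
          simp [List.isPrefixOf, Ne.symm hc]
        simp only [hpre, Bool.false_eq_true, if_false]
        rw [ih rest (c :: cur) acc (by simpa using Nat.lt_of_succ_lt_succ h)]
        simp only [splitNl, hc, if_false]
        cases hs : splitNl rest with
        | nil => exact absurd hs (splitNl_ne_nil rest)
        | cons a b => simp [consHead]

theorem splitOn_eq_splitNl (cs : List Char) :
    PySem.Chars.splitOn cs ['\n'] = splitNl cs := by
  unfold PySem.Chars.splitOn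
  rw [splitOn_go_eq (cs.length + 1) cs [] [] (by omega)]
  simp [consHead_nil _ (splitNl_ne_nil cs)]

-- what A emits for one line
def procLine (l : List Char) : List Char :=
  (if PySem.Chars.startswith l ['#'] then l else '#' :: l) ++ ['\n']

theorem foldlA_eq (ls : List (List Char)) : ∀ (init : String),
    ((ls.map String.ofList).foldl
      (fun commented line =>
        if !(PySem.Str.startswith line "#") then commented ++ "#" ++ line ++ "\n"
        else commented ++ line ++ "\n") init).toList
      = init.toList ++ ls.flatMap procLine := by
  induction ls with
  | nil => intro init; simp
  | cons l t ih =>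
    intro init
    simp only [List.map_cons, List.foldl_cons, List.flatMap_cons]
    rw [ih]
    by_cases h : PySem.Chars.startswith l ['#'] = true
    · simp [h, procLine, String.toList_append]
    · simp only [Bool.not_eq_true] at h
      simp [h, procLine, String.toList_append]

-- what remains when we are mid-line: the first piece is already begun, no '#' decision left
def tailProc (cs : List Char) : List Char :=
  (splitNl cs).headD [] ++ ['\n'] ++ ((splitNl cs).tail).flatMap procLine

-- B's closing step (the code after the loop, up to the final extra '\n')
def finB (st : List Char × Bool) : List Char :=
  (if st.2 then st.1 ++ ['#'] else st.1) ++ ['\n']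

theorem foldlB_eq (cs : List Char) : ∀ (out : List Char) (flag : Bool),
    finB (cs.foldl stepB (out, flag))
      = out ++ (if flag then (splitNl cs).flatMap procLine else tailProc cs) := by
  induction cs with
  | nil =>
    intro out flag
    cases flag <;> simp [finB, splitNl, tailProc, procLine, PySem.Chars.startswith, List.isPrefixOf]
  | cons c rest ih =>
    intro out flag
    simp only [List.foldl_cons]
    by_cases hc : c = '\n'
    · subst hc
      have h1 : splitNl ('\n' :: rest) = [] :: splitNl rest := by simp [splitNl]
      cases flag
      · rw [show stepB (out, false) '\n' = (out ++ ['\n'], true) by simp [stepB]]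
        rw [ih (out ++ ['\n']) true]
        simp [tailProc, h1]
      · rw [show stepB (out, true) '\n' = (out ++ ['#'] ++ ['\n'], true) by simp [stepB]]
        rw [ih (out ++ ['#'] ++ ['\n']) true]
        have hp : procLine [] = ['#', '\n'] := by decide
        simp [h1, hp]
    · have hsplit : ∃ h t, splitNl rest = h :: t := by
        cases hs : splitNl rest with
        | nil => exact absurd hs (splitNl_ne_nil rest)
        | cons a b => exact ⟨a, b, rfl⟩
      obtain ⟨hd, tl, hs⟩ := hsplit
      have h1 : splitNl (c :: rest) = (c :: hd) :: tl := by simp [splitNl, hc, hs]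
      have hnc : (c == '\n') = false := by simp [hc]
      cases flag
      · rw [show stepB (out, false) c = (out ++ [c], c == '\n') by simp [stepB]]
        rw [hnc, ih (out ++ [c]) false]
        simp [tailProc, h1, hs]
      · by_cases hh : c = '#'
        · subst hh
          rw [show stepB (out, true) '#' = (out ++ ['#'], false) by simp [stepB]]
          rw [ih (out ++ ['#']) false]
          have hp : procLine ('#' :: hd) = '#' :: hd ++ ['\n'] := by
            simp [procLine, PySem.Chars.startswith, List.isPrefixOf]
          simp [tailProc, h1, hs, hp]
        · rw [show stepB (out, true) c = (out ++ ['#'] ++ [c], c == '\n') by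
            simp [stepB, hh]]
          rw [hnc, ih (out ++ ['#'] ++ [c]) false]
          have hp : procLine (c :: hd) = '#' :: c :: hd ++ ['\n'] := by
            simp [procLine, PySem.Chars.startswith, List.isPrefixOf, Ne.symm hh]
          simp [tailProc, h1, hs, hp]

-- ===== VERDICT (by name: the statement is the Claim_ definition above) =====
theorem comment_paragraph_spec : Claim_equal_comment_paragraph := by
  intro paragraph _
  unfold Spec_comment_paragraph comment_paragraph comment_paragraph_alt
  have hsep : ("\n" : String).toList = ['\n'] := by decide
  have hB := foldlB_eq paragraph.toList [] true
  simp only [finB, if_true, List.nil_append] at hB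
  have hA := foldlA_eq (splitNl paragraph.toList) ""
  apply String.toList_injective
  simp only [String.toList_append]
  rw [hsep, splitOn_eq_splitNl, hA]
  simp only [String.toList_ofList]
  rw [← hB]
  simp
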